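-- pv_equiv track=rewrite | github.com/sabbir-404/Python-Code | Codeforce/Find Minimum Operations.py | min_stepcount
-- ===== SOURCE A (Python) =====
-- def min_stepcount(n, k):
--     step = 0
--     current_power = 1
--     i = 0
--
--     while current_power * k <= n:
--         current_power *= k
--         i += 1
--
--     while n > 0:
--         n -= current_power
--         step += 1
--
--         if current_power * k <= n:
--             current_power *= k
--         elif current_power > 1:
--             current_power //= k
--
--     return step
-- ===== SOURCE B (Python) =====
-- def _run(k, bound, m, q):
--     # largest t <= m with q * k^t <= bound (given q <= bound); returns (t, k^t)
--     t, p = 0, 1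
--     while t < m and q * k <= bound:
--         q *= k
--         p *= k
--         t += 1
--     return t, p
--
--
-- def min_stepcount(n, k):
--     # Computes A's step count by jumping over each maximal descending run in
--     # closed form: along a run, C = (k-1)*r - km*k is invariant and A's
--     # grow/exit tests are threshold comparisons of powers of k against C.
--     if n <= 0:
--         return 0
--     km, m = 1, 0                      # largest power of k <= n, and its exponent
--     while km * k <= n:
--         km *= k
--         m += 1
--     g = k * k - k - 1
--     steps, r = 0, n
--     while True:
--         C = (k - 1) * r - km * k
--         if C < 0:
--             # run ends by exhaustion at step m+1-t, t = largest t<=m with k^t <= -C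
--             t, _ = _run(k, -C, m, 1)
--             return steps + m + 1 - t
--         if g > C:
--             # no grow ever again: m+1 descending steps, then unit steps to zero
--             return steps + m + 1 + r - (km * k - 1) // (k - 1)
--         # grow fires at step m+1-t, t = largest t<=m with g * k^t <= C
--         t, p = _run(k, C, m, g)
--         steps += m + 1 - t
--         r -= (km * k - p) // (k - 1)
--         km, m = p * k, t + 1
-- ===== Notes on version B (the rewrite author's own statement) =====
-- stated objective: faster
-- what changed: B never simulates A's per-step subtractions: it exploits that C=(k-1)*r-km*k is invariant along each maximal descending run of A's walk, so each run's length is obtained in closed form by locating a power-of-k threshold against C (and the unit-subtraction tail becomes pure arithmetic), jumping whole runs at a time.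
-- outside the precondition, e.g. on min_stepcount(6, -3): A returns 2, B returns 1
import Mathlib
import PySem

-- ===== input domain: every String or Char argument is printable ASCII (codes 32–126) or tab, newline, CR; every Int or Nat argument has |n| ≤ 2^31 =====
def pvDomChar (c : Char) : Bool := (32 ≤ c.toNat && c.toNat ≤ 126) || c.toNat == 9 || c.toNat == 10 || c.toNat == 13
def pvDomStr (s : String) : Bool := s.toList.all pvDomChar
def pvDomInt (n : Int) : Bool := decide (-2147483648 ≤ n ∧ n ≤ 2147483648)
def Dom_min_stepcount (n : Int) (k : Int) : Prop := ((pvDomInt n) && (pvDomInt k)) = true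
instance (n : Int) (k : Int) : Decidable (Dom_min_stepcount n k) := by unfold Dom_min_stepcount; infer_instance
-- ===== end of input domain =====

-- B computes A's step count without simulating the per-step subtractions: along each
-- maximal descending run of A's walk the quantity C = (k-1)*r - km*k is invariant, so
-- the run's length is found by a power-of-k threshold search against C and whole runs
-- (including A's unit-subtraction tail) are jumped in closed form.

-- ===== PORT A =====
-- first while loop of A: grow current_power while current_power * k <= n (i tracked as in the source)
def aPow (k n : Int) : Nat → Int → Int → Int × Int
  | 0, cp, i => (cp, i)
  | f+1, cp, i => if cp * k ≤ n then aPow k n f (cp * k) (i + 1) else (cp, i)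

-- second while loop of A
def aLoop (k : Int) : Nat → Int → Int → Int → Int
  | 0, _, _, step => step
  | f+1, n, cp, step =>
    if 0 < n then
      let n' := n - cp
      let step' := step + 1
      let cp' := if cp * k ≤ n' then cp * k
                 else if 1 < cp then PySem.Int.floordiv cp k else cp
      aLoop k f n' cp' step'
    else step

def min_stepcount (n : Int) (k : Int) : Int :=
  aLoop k (n.toNat + 1) n (aPow k n (n.toNat + 1) 1 0).1 0

-- ===== PORT B =====
-- Source B's helper _run: largest t <= m (fuel) with q * k^t <= bound; returns (t, k^t)
def bRun (k bound : Int) : Nat → Int → Int → Int → Int × Int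
  | 0, t, _, p => (t, p)
  | f+1, t, q, p => if q * k ≤ bound then bRun k bound f (t + 1) (q * k) (p * k) else (t, p)

-- Source B's first loop: largest power of k <= n together with its exponent
def bPow (k n : Int) : Nat → Int → Int → Int × Int
  | 0, km, m => (km, m)
  | f+1, km, m => if km * k ≤ n then bPow k n f (km * k) (m + 1) else (km, m)

-- Source B's main loop: one iteration per maximal descending run
def bLoop (k g : Int) : Nat → Int → Int → Int → Int → Int
  | 0, _, _, _, steps => steps
  | f+1, r, km, m, steps =>
    let C := (k - 1) * r - km * k
    if C < 0 then
      steps + m + 1 - (bRun k (-C) m.toNat 0 1 1).1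
    else if g > C then
      steps + m + 1 + r - PySem.Int.floordiv (km * k - 1) (k - 1)
    else
      let tp := bRun k C m.toNat 0 g 1
      bLoop k g f (r - PySem.Int.floordiv (km * k - tp.2) (k - 1)) (tp.2 * k) (tp.1 + 1)
        (steps + m + 1 - tp.1)

def min_stepcount_alt (n : Int) (k : Int) : Int :=
  if n ≤ 0 then 0
  else
    let km := bPow k n (n.toNat + 1) 1 0
    bLoop k (k * k - k - 1) (n.toNat + 1) n km.1 km.2 0

-- ===== PRECONDITION & SPEC =====
-- Pre_ excludes n ≥ 1 with k ≤ 1 and n = 0 with k = 0: there A loops forever on k in {0,1}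
-- and on most negative k, returning only accidentally for some negative k when a power of k
-- lands exactly; B's run arithmetic assumes k ≥ 2, so on those inputs it diverges or
-- returns a different accidental count.
def Pre_min_stepcount (n : Int) (k : Int) : Prop := 2 ≤ k ∨ n < 0 ∨ (n = 0 ∧ k ≠ 0)
instance (n : Int) (k : Int) : Decidable (Pre_min_stepcount n k) := by unfold Pre_min_stepcount; infer_instance
def pvWitness_min_stepcount : Int × Int := (100, 3)

def Spec_min_stepcount (n : Int) (k : Int) (out : Int) : Prop := out = min_stepcount_alt n k
instance (n : Int) (k : Int) (out : Int) : Decidable (Spec_min_stepcount n k out) := by unfold Spec_min_stepcount; infer_instance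

-- ===== CLAIM (what is proved, stated in full; the proofs are below) =====
def Claim_equal_min_stepcount : Prop := ∀ (n : Int) (k : Int), Dom_min_stepcount n k → Pre_min_stepcount n k → Spec_min_stepcount n k (min_stepcount n k)

-- ===== LEMMAS AND PROOFS =====

theorem aLoop_nonpos (k : Int) (f : Nat) (n cp step : Int) (hn : n ≤ 0) (hf : 0 < f) :
    aLoop k f n cp step = step := by
  cases f with
  | zero => omega
  | succ f => simp [aLoop, not_lt.mpr hn]

theorem aPow_spec (k n : Int) (hk : 2 ≤ k) :
    ∀ (f : Nat) (cp i : Int) (e : Nat), cp = k ^ e → cp ≤ n → n.toNat < f + cp.toNat →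
    ∃ e' : Nat, (aPow k n f cp i).1 = k ^ e' ∧ (k:Int) ^ e' ≤ n ∧ n < k ^ e' * k := by
  intro f
  induction f with
  | zero =>
    intro cp i e hcp hle hf
    have h1 : (1:Int) ≤ cp := hcp ▸ one_le_pow₀ (by omega)
    omega
  | succ f ih =>
    intro cp i e hcp hle hf
    by_cases h : cp * k ≤ n
    · have h1 : (1:Int) ≤ cp := hcp ▸ one_le_pow₀ (by omega)
      have h2 : cp + 1 ≤ cp * k := by nlinarith
      have := ih (cp * k) (i + 1) (e + 1) (by rw [hcp, pow_succ]) h (by omega)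
      simpa [aPow, h] using this
    · exact ⟨e, by simp only [aPow, if_neg h]; exact hcp, hcp ▸ hle, by rw [← hcp]; omega⟩

theorem bPow_spec (k n : Int) (hk : 2 ≤ k) :
    ∀ (f : Nat) (km m : Int) (e : Nat), km = k ^ e → m = (e:Int) → km ≤ n → n.toNat < f + km.toNat →
    ∃ e' : Nat, bPow k n f km m = (k ^ e', (e':Int)) ∧ (k:Int) ^ e' ≤ n ∧ n < k ^ e' * k := by
  intro f
  induction f with
  | zero =>
    intro km m e hkm hm hle hf
    have h1 : (1:Int) ≤ km := hkm ▸ one_le_pow₀ (by omega)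
    omega
  | succ f ih =>
    intro km m e hkm hm hle hf
    by_cases h : km * k ≤ n
    · have h1 : (1:Int) ≤ km := hkm ▸ one_le_pow₀ (by omega)
      have h2 : km + 1 ≤ km * k := by nlinarith
      have := ih (km * k) (m + 1) (e + 1) (by rw [hkm, pow_succ]) (by omega) h (by omega)
      simpa [bPow, h] using this
    · exact ⟨e, by simp only [bPow, if_neg h]; rw [hkm, hm], hkm ▸ hle, by rw [← hkm]; omega⟩

theorem pow_window_unique (k n : Int) (hk : 2 ≤ k) (a b : Nat)
    (h1 : (k:Int) ^ a ≤ n) (h2 : n < k ^ a * k) (h3 : (k:Int) ^ b ≤ n) (h4 : n < k ^ b * k) :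
    a = b := by
  rcases Nat.lt_trichotomy a b with h | h | h
  · have : (k:Int) ^ (a + 1) ≤ k ^ b := pow_le_pow_right₀ (by omega) (by omega)
    rw [pow_succ] at this; omega
  · exact h
  · have : (k:Int) ^ (b + 1) ≤ k ^ a := pow_le_pow_right₀ (by omega) (by omega)
    rw [pow_succ] at this; omega

theorem aLoop_unit (k : Int) (_hk : 2 ≤ k) :
    ∀ (f : Nat) (n step : Int), 0 ≤ n → n ≤ k → n.toNat < f →
    aLoop k f n 1 step = step + n := by
  intro f
  induction f with
  | zero => intro n step hn0 hnk hf; omega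
  | succ f ih =>
    intro n step hn0 hnk hf
    by_cases h : 0 < n
    · have hng : ¬ (1 * k ≤ n - 1) := by omega
      have hns : ¬ ((1:Int) < 1) := by omega
      have := ih (n - 1) (step + 1) (by omega) (by omega) (by omega)
      simp only [aLoop, if_pos h, hng, if_false, hns, if_false] at *
      rw [this]; ring
    · have hn : n = 0 := by omega
      simp [aLoop, hn]

theorem floordiv_pow_succ (k : Int) (hk : 2 ≤ k) (e : Nat) :
    PySem.Int.floordiv ((k:Int) ^ (e + 1)) k = k ^ e := by
  rw [PySem.Int.floordiv_eq_ediv_of_pos (by omega), pow_succ]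
  exact Int.mul_ediv_cancel _ (by omega)

-- Bernoulli for powers of k
theorem bern (k : Int) (hk : 2 ≤ k) : ∀ e : Nat, 1 + (e:Int) * (k - 1) ≤ k ^ e := by
  intro e
  induction e with
  | zero => simp
  | succ e ih =>
    have hp : (0:Int) < k ^ e := pow_pos (by omega) e
    rw [pow_succ]
    push_cast
    nlinarith

theorem pow_sub_dvd (k : Int) (a b : Nat) (h : b ≤ a) : (k - 1) ∣ k ^ a - k ^ b := by
  have h1 : (k - 1) ∣ k ^ (a - b) - 1 := by
    have := sub_dvd_pow_sub_pow k 1 (a - b)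
    simpa using this
  have h2 : k ^ a - k ^ b = k ^ b * (k ^ (a - b) - 1) := by
    rw [mul_sub, mul_one, ← pow_add]
    congr 2
    omega
  rw [h2]
  exact Dvd.dvd.mul_left h1 _

theorem floordiv_pow_sub (k : Int) (hk : 2 ≤ k) (a b : Nat) (h : b ≤ a) :
    (k - 1) * PySem.Int.floordiv ((k:Int) ^ a - k ^ b) (k - 1) = k ^ a - k ^ b := by
  rw [PySem.Int.floordiv_eq_ediv_of_pos (by omega)]
  exact Int.mul_ediv_cancel' (pow_sub_dvd k a b h)

theorem bRun_spec (k b q0 : Int) :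
    ∀ (f : Nat) (t0 : Int) (u : Nat),
    ∃ d : Nat, d ≤ f ∧ bRun k b f t0 (q0 * k ^ u) (k ^ u) = (t0 + (d:Int), k ^ (u + d)) ∧
      (d = 0 ∨ q0 * k ^ (u + d) ≤ b) ∧ (d = f ∨ ¬ q0 * k ^ (u + d + 1) ≤ b) := by
  intro f
  induction f with
  | zero =>
    intro t0 u
    exact ⟨0, le_refl 0, by simp [bRun], Or.inl rfl, Or.inl rfl⟩
  | succ f ih =>
    intro t0 u
    by_cases h : q0 * k ^ u * k ≤ b
    · obtain ⟨d, hd, hres, hc2, hc3⟩ := ih (t0 + 1) (u + 1)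
      refine ⟨d + 1, by omega, ?_, ?_, ?_⟩
      · rw [show bRun k b (f+1) t0 (q0 * k ^ u) (k ^ u) =
            bRun k b f (t0 + 1) (q0 * k ^ u * k) (k ^ u * k) from by simp [bRun, h]]
        rw [show q0 * k ^ u * k = q0 * k ^ (u + 1) from by rw [pow_succ]; ring,
            show (k:Int) ^ u * k = k ^ (u + 1) from by rw [pow_succ]]
        rw [hres]
        simp only [Prod.mk.injEq]
        exact ⟨by push_cast; ring, by congr 1; omega⟩
      · rcases hc2 with h0 | hle
        · subst h0
          exact Or.inr (by simpa [pow_succ, mul_assoc] using h)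
        · exact Or.inr (by rw [show u + (d + 1) = u + 1 + d from by omega]; exact hle)
      · rcases hc3 with h0 | hgt
        · exact Or.inl (by omega)
        · exact Or.inr (by rw [show u + (d + 1) + 1 = u + 1 + d + 1 from by omega]; exact hgt)
    · exact ⟨0, by omega, by simp [bRun, h], Or.inl rfl,
        Or.inr (by rw [show u + 0 + 1 = u + 1 from by omega, pow_succ, ← mul_assoc]; exact h)⟩

-- A executes d consecutive shrink steps; C is the run invariant
theorem descend (k g C : Int) (hk : 2 ≤ k) (hg : g = k * k - k - 1) :
    ∀ (d e f : Nat) (r r' s : Int), d ≤ e → d ≤ f →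
    (k - 1) * r = C + k ^ (e + 1) →
    0 < C + k ^ (e - d + 1) →
    C < g * k ^ (e - d + 1) →
    (k - 1) * r' = C + k ^ (e - d + 1) →
    aLoop k f r (k ^ e) s = aLoop k (f - d) r' (k ^ (e - d)) (s + (d:Int)) := by
  intro d
  induction d with
  | zero =>
    intro e f r r' s _ _ hr _ _ hr'
    have heq : (k - 1) * r = (k - 1) * r' := by rw [hr, hr']; norm_num
    have : r = r' := mul_left_cancel₀ (show (k:Int) - 1 ≠ 0 by omega) heq
    simp [this]
  | succ d ih =>
    intro e f r r' s hde hdf hr hpos hgrow hr'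
    cases e with
    | zero => omega
    | succ E =>
      cases f with
      | zero => omega
      | succ F =>
        have hk1 : (1:Int) ≤ k := by omega
        have hEd : E + 1 - (d + 1) = E - d := by omega
        rw [hEd] at hpos hgrow hr'
        have hple : (k:Int) ^ (E - d + 1) ≤ k ^ (E + 1) := pow_le_pow_right₀ hk1 (by omega)
        have hp1 : (0:Int) < k ^ (E + 1) := pow_pos (by omega) _
        have hppos : (0:Int) < k ^ (E - d + 1) := pow_pos (by omega) _
        have hrX : (k - 1) * r = C + k ^ (E + 1) * k := by rw [hr, pow_succ]
        have hr0 : 0 < r := by nlinarith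
        have hgE : C < g * k ^ (E + 1) := by
          have hgpos : (0:Int) < g := by rw [hg]; nlinarith
          have : g * k ^ (E - d + 1) ≤ g * k ^ (E + 1) :=
            mul_le_mul_of_nonneg_left hple (by omega)
          omega
        have hng : ¬ ((k:Int) ^ (E + 1) * k ≤ r - k ^ (E + 1)) := by
          intro hcon
          have hcon' := mul_le_mul_of_nonneg_left hcon (show (0:Int) ≤ k - 1 by omega)
          have : g * k ^ (E + 1) ≤ C := by rw [hg]; nlinarith
          omega
        have hgt1 : (1:Int) < k ^ (E + 1) := one_lt_pow₀ (by omega) (by omega)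
        have hstep : aLoop k (F + 1) r (k ^ (E + 1)) s =
            aLoop k F (r - k ^ (E + 1)) (k ^ E) (s + 1) := by
          simp only [aLoop, if_pos hr0, if_neg hng, if_pos hgt1, floordiv_pow_succ k hk E]
        rw [hstep]
        have := ih E F (r - k ^ (E + 1)) r' (s + 1) (by omega) (by omega)
          (by rw [pow_succ] at hr ⊢; ring_nf; ring_nf at hr; linarith) hpos hgrow hr'
        rw [this]
        have h1 : F + 1 - (d + 1) = F - d := by omega
        rw [h1, hEd]
        congr 1
        push_cast
        ring

theorem aLoop_step_exit (k : Int) (F : Nat) (n cp step : Int) (h0 : 0 < n)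
    (hexit : n - cp ≤ 0) (hF : 0 < F) :
    aLoop k (F + 1) n cp step = step + 1 := by
  simp only [aLoop, if_pos h0]
  exact aLoop_nonpos k F _ _ _ hexit hF

theorem aLoop_step_grow (k : Int) (F : Nat) (n cp step : Int) (h0 : 0 < n)
    (hg : cp * k ≤ n - cp) :
    aLoop k (F + 1) n cp step = aLoop k F (n - cp) (cp * k) (step + 1) := by
  simp only [aLoop, if_pos h0, if_pos hg]

-- main simulation: one bLoop iteration = one maximal descending run of aLoop
set_option maxHeartbeats 1600000 in
theorem sim (k g : Int) (hk : 2 ≤ k) (hg : g = k * k - k - 1) :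
    ∀ (fb fa : Nat) (e : Nat) (r s : Int),
    0 < r → k ^ e ≤ r → r.toNat < fa → r.toNat < fb →
    aLoop k fa r (k ^ e) s = bLoop k g fb r (k ^ e) (e:Int) s := by
  intro fb
  induction fb with
  | zero => intro fa e r s hr0 _ _ hfb; omega
  | succ fb ih =>
    intro fa e r s hr0 hker hfa hfb
    have hk0 : (0:Int) < k := by omega
    have hgpos : (0:Int) < g := by rw [hg]; nlinarith
    have hepow : (e:Int) + 1 ≤ k ^ e := by
      have := bern k hk e
      nlinarith
    have hfaI : r < (fa:Int) := by omega
    have hfbI : r < (fb:Int) + 1 := by omega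
    have hfae : (e:Int) + 2 ≤ fa := by
      have : (e:Int) + 1 ≤ r := le_trans hepow hker
      omega
    set C : Int := (k - 1) * r - k ^ e * k with hCdef
    have hCr : (k - 1) * r = C + k ^ (e + 1) := by rw [hCdef, pow_succ]; ring
    by_cases hC0 : C < 0
    · -- exhaustion run: A descends e-d steps, then one final step reaches n ≤ 0
      obtain ⟨d, hd, hrun, hc2, hc3⟩ := bRun_spec k (-C) 1 e 0 0
      have hrun' : bRun k (-C) e 0 1 1 = ((d:Int), k ^ d) := by simpa using hrun
      have hkd : (k:Int) ^ d ≤ -C := by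
        rcases hc2 with h0 | h
        · subst h0; simp only [pow_zero]; omega
        · simpa using h
      have hB : bLoop k g (fb + 1) r (k ^ e) (e:Int) s = s + (e:Int) + 1 - (d:Int) := by
        simp only [bLoop, Int.toNat_natCast, ← hCdef, if_pos hC0, hrun']
      rw [hB]
      obtain ⟨c, hcdvd⟩ := pow_sub_dvd k (e + 1) (d + 1) (by omega)
      have hr' : (k - 1) * (r - c) = C + k ^ (d + 1) := by rw [mul_sub]; linarith
      have hpos : 0 < C + k ^ (d + 1) := by
        rcases hc3 with h0 | h
        · subst h0; nlinarith
        · simp only [zero_add, one_mul, not_le] at h; linarith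
      have hgrow1 : C < g * k ^ (d + 1) := by
        have := mul_pos hgpos (pow_pos hk0 (d + 1))
        linarith
      have hdesc := descend k g C hk hg (e - d) e fa r (r - c) s (by omega) (by omega)
        hCr
        (by rw [show e - (e - d) + 1 = d + 1 from by omega]; exact hpos)
        (by rw [show e - (e - d) + 1 = d + 1 from by omega]; exact hgrow1)
        (by rw [show e - (e - d) + 1 = d + 1 from by omega]; exact hr')
      rw [show e - (e - d) = d from by omega] at hdesc
      rw [hdesc]
      have hF : fa - (e - d) = (fa - (e - d) - 1) + 1 := by omega
      rw [hF]
      have hps : (k:Int) ^ (d + 1) = k ^ d * k := pow_succ k d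
      have hpd : (0:Int) < k ^ d := pow_pos hk0 d
      have hr'0 : 0 < r - c := by nlinarith
      have hexit : (r - c) - k ^ d ≤ 0 := by nlinarith [hr', hkd, hps, hpd]
      rw [aLoop_step_exit k (fa - (e - d) - 1) (r - c) (k ^ d) (s + ((e - d : Nat) : Int))
        hr'0 hexit (by omega)]
      rw [Nat.cast_sub (by omega : d ≤ e)]
      ring
    · by_cases hgC : g > C
      · -- terminal run: descend to power 1, then unit subtractions, in closed form
        have hB : bLoop k g (fb + 1) r (k ^ e) (e:Int) s
            = s + (e:Int) + 1 + r - PySem.Int.floordiv (k ^ e * k - 1) (k - 1) := by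
          simp only [bLoop, Int.toNat_natCast, ← hCdef, if_neg hC0, if_pos hgC]
        rw [hB]
        obtain ⟨c, hcdvd⟩ := pow_sub_dvd k (e + 1) 1 (by omega)
        rw [pow_one] at hcdvd
        have hr' : (k - 1) * (r - c) = C + k := by rw [mul_sub]; linarith
        have hdesc := descend k g C hk hg e e fa r (r - c) s (by omega) (by omega)
          hCr
          (by rw [show e - e + 1 = 1 from by omega, pow_one]; omega)
          (by rw [show e - e + 1 = 1 from by omega, pow_one]; nlinarith)
          (by rw [show e - e + 1 = 1 from by omega, pow_one]; exact hr')
        rw [show e - e = 0 from by omega, pow_zero] at hdesc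
        rw [hdesc]
        have hcge : (e:Int) ≤ c := by
          have hb := bern k hk e
          have hpe : (0:Int) < k ^ e := pow_pos hk0 e
          nlinarith
        have hr'pos : 0 < r - c := by nlinarith
        have hr'le : r - c ≤ k := by nlinarith
        rw [aLoop_unit k hk (fa - e) (r - c) (s + (e:Int)) (by omega) hr'le (by omega)]
        have hQ := floordiv_pow_sub k hk (e + 1) 0 (by omega)
        rw [pow_zero] at hQ
        rw [show (k:Int) ^ e * k = k ^ (e + 1) from (pow_succ k e).symm]
        have hQc : PySem.Int.floordiv ((k:Int) ^ (e + 1) - 1) (k - 1) = c + 1 := by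
          apply mul_left_cancel₀ (show (k:Int) - 1 ≠ 0 from by omega)
          rw [hQ]; ring_nf; linarith
        rw [hQc]
        ring
      · -- grow run: jump the descending prefix, take the growing step, recurse
        rw [gt_iff_lt, not_lt] at hgC
        obtain ⟨d, hd, hrun, hc2, hc3⟩ := bRun_spec k C g e 0 0
        have hrun' : bRun k C e 0 g 1 = ((d:Int), k ^ d) := by simpa using hrun
        have hgd : g * k ^ d ≤ C := by
          rcases hc2 with h0 | h
          · subst h0; simpa using hgC
          · simpa using h
        have hB : bLoop k g (fb + 1) r (k ^ e) (e:Int) s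
            = bLoop k g fb (r - PySem.Int.floordiv (k ^ e * k - k ^ d) (k - 1)) (k ^ d * k)
                ((d:Int) + 1) (s + (e:Int) + 1 - (d:Int)) := by
          simp only [bLoop, Int.toNat_natCast, ← hCdef, if_neg hC0, if_neg (not_lt.mpr hgC),
            hrun']
        rw [hB]
        obtain ⟨c, hcdvd⟩ := pow_sub_dvd k (e + 1) (d + 1) (by omega)
        have hr'' : (k - 1) * (r - c) = C + k ^ (d + 1) := by rw [mul_sub]; linarith
        have hAdesc : aLoop k fa r (k ^ e) s
            = aLoop k (fa - (e - d)) (r - c) (k ^ d) (s + ((e - d : Nat) : Int)) := by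
          by_cases hde : d = e
          · have hc0 : c = 0 := by
              have h1 : (k - 1) * c = 0 := by rw [hde] at hcdvd; linarith
              rcases mul_eq_zero.mp h1 with h | h
              · omega
              · exact h
            rw [hde, show e - e = 0 from by omega, hc0]
            norm_num
          · have hgrow3 : C < g * k ^ (d + 1) := by
              rcases hc3 with h0 | h
              · omega
              · simpa using h
            have := descend k g C hk hg (e - d) e fa r (r - c) s (by omega) (by omega)
              hCr
              (by rw [show e - (e - d) + 1 = d + 1 from by omega]
                  have := pow_pos hk0 (d + 1); linarith)
              (by rw [show e - (e - d) + 1 = d + 1 from by omega]; exact hgrow3)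
              (by rw [show e - (e - d) + 1 = d + 1 from by omega]; exact hr'')
            rw [show e - (e - d) = d from by omega] at this
            exact this
        rw [hAdesc]
        have hF : fa - (e - d) = (fa - (e - d) - 1) + 1 := by omega
        rw [hF]
        have hpd : (0:Int) < k ^ d := pow_pos hk0 d
        have hps : (k:Int) ^ (d + 1) = k ^ d * k := pow_succ k d
        have hr''0 : 0 < r - c := by nlinarith
        have hgrowstep : k ^ d * k ≤ (r - c) - k ^ d := by nlinarith [hr'', hgd, hg, hps, hpd]
        rw [aLoop_step_grow k (fa - (e - d) - 1) (r - c) (k ^ d) (s + ((e - d : Nat) : Int))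
          hr''0 hgrowstep]
        -- identify B's recursive arguments with A's state after the grow step
        have hQ := floordiv_pow_sub k hk (e + 1) d (by omega)
        have hQc : PySem.Int.floordiv ((k:Int) ^ (e + 1) - k ^ d) (k - 1) = c + k ^ d := by
          apply mul_left_cancel₀ (show (k:Int) - 1 ≠ 0 from by omega)
          rw [hQ]
          have : (k:Int) ^ (d + 1) = k ^ d * k := pow_succ k d
          ring_nf; nlinarith [hcdvd, this]
        rw [show (k:Int) ^ e * k = k ^ (e + 1) from (pow_succ k e).symm, hQc]
        have harg : r - (c + k ^ d) = (r - c) - k ^ d := by ring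
        rw [harg]
        -- key size fact: the run consumed at least (e-d)+1 units of r
        have hkey : ((e:Int) - d) + 1 ≤ c + k ^ d := by
          have hb2 := bern k hk (e - d + 1)
          have hsplit : (k:Int) ^ d * k ^ (e - d + 1) = k ^ (e + 1) := by
            rw [← pow_add]; congr 1; omega
          have hpb : (0:Int) < k ^ (e - d + 1) := pow_pos hk0 _
          have hcast : ((e - d + 1 : Nat) : Int) = (e:Int) - d + 1 := by
            push_cast [Nat.cast_sub (show d ≤ e from by omega)]; ring
          rw [hcast] at hb2
          nlinarith [mul_nonneg (show (0:Int) ≤ k ^ d - 1 from by nlinarith)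
            (show (0:Int) ≤ k ^ (e - d + 1) - 1 from by nlinarith)]
        have hn'pos : 0 < (r - c) - k ^ d := by nlinarith
        have hIH := ih (fa - (e - d) - 1) (d + 1) ((r - c) - k ^ d)
          (s + (e:Int) + 1 - (d:Int)) hn'pos
          (by rw [pow_succ]; exact hgrowstep)
          (by
            have h1 : (r - c) - k ^ d + (((e:Int) - d) + 1) ≤ r := by linarith
            have h2 : ((e - d : Nat) : Int) = (e:Int) - d := Nat.cast_sub (by omega)
            omega)
          (by
            have h1 : (r - c) - k ^ d + 1 ≤ r := by nlinarith
            omega)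
        rw [show ((d:Int) + 1) = ((d + 1 : Nat) : Int) from by push_cast; ring]
        rw [show (k:Int) ^ d * k = k ^ (d + 1) from (pow_succ k d).symm]
        rw [show s + ((e - d : Nat) : Int) + 1 = s + (e:Int) + 1 - (d:Int) from by
          rw [Nat.cast_sub (show d ≤ e from by omega)]; ring]
        exact hIH

-- ===== VERDICT (by name: the statement is the Claim_ definition above) =====
theorem min_stepcount_spec : Claim_equal_min_stepcount := by
  intro n k _hdom hpre
  unfold Spec_min_stepcount min_stepcount min_stepcount_alt
  by_cases hn : n ≤ 0
  · rw [if_pos hn, aLoop_nonpos k (n.toNat + 1) n _ 0 hn (by omega)]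
  · replace hn : 0 < n := by omega
    have hk : 2 ≤ k := by
      rcases hpre with h | h | h
      · exact h
      · omega
      · omega
    rw [if_neg (by omega)]
    obtain ⟨ea, hea, hea1, hea2⟩ :=
      aPow_spec k n hk (n.toNat + 1) 1 0 0 (by simp) (by omega) (by omega)
    obtain ⟨eb, heb, heb1, heb2⟩ :=
      bPow_spec k n hk (n.toNat + 1) 1 0 0 (by simp) (by simp) (by omega) (by omega)
    have hab : ea = eb := pow_window_unique k n hk ea eb hea1 hea2 heb1 heb2
    rw [hea, heb, ← hab]
    exact sim k (k * k - k - 1) hk rfl (n.toNat + 1) (n.toNat + 1) ea n 0 hn hea1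
      (by omega) (by omega)
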